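-- pv_equiv track=rewrite | github.com/1Jayakrishnan/GFG--POTD | JULY 2024/Maximum Connected group.py | MaxConnection
-- ===== SOURCE A (Python) =====
-- from typing import List, Tuple
--
-- def MaxConnection(grid: List[List[int]]) -> int:
--     n = len(grid)
--     if n == 0:
--         return 0
--
--     def dfs(x: int, y: int, comp_id: int) -> int:
--         stack = [(x, y)]
--         visited.add((x, y))
--         component_map[(x, y)] = comp_id
--         count = 0
--         while stack:
--             cx, cy = stack.pop()
--             count += 1
--             for nx, ny in [(cx-1, cy), (cx+1, cy), (cx, cy-1), (cx, cy+1)]: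
--                 if 0 <= nx < n and 0 <= ny < n and grid[nx][ny] == 1 and (nx, ny) not in visited:
--                     visited.add((nx, ny))
--                     component_map[(nx, ny)] = comp_id
--                     stack.append((nx, ny))
--         return count
--
--     visited = set()
--     component_size = {}
--     component_map = {}
--     component_id = 0
--
--     # Step 1: Identify and count all connected components of 1s
--     for i in range(n):
--         for j in range(n):
--             if grid[i][j] == 1 and (i, j) not in visited:
--                 size = dfs(i, j, component_id)
--                 component_size[component_id] = size
--                 component_id += 1
--
--     max_size = max(component_size.values(), default=0)
--
--     # Step 2: Evaluate changing each 0 to 1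
--     for i in range(n):
--         for j in range(n):
--             if grid[i][j] == 0:
--                 seen_components = set()
--                 new_size = 1  # We are changing grid[i][j] from 0 to 1
--                 for ni, nj in [(i-1, j), (i+1, j), (i, j-1), (i, j+1)]:
--                     if 0 <= ni < n and 0 <= nj < n and grid[ni][nj] == 1:
--                         comp_id = component_map[(ni, nj)]
--                         if comp_id not in seen_components:
--                             seen_components.add(comp_id)
--                             new_size += component_size[comp_id]
--                 max_size = max(max_size, new_size)
--
--     return max_size
-- ===== SOURCE B (Python) =====
-- def MaxConnection(grid):
--     n = len(grid)
--     best = 0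
--     comp = {}  # 1-cell -> its whole component (a set of cells), via fixpoint saturation
--     for i in range(n):
--         for j in range(n):
--             if grid[i][j] == 1 and (i, j) not in comp:
--                 s = {(i, j)}
--                 while True:
--                     t = s | {(x + dx, y + dy) for (x, y) in s
--                              for (dx, dy) in ((-1, 0), (1, 0), (0, -1), (0, 1))
--                              if 0 <= x + dx < n and 0 <= y + dy < n
--                              and grid[x + dx][y + dy] == 1}
--                     if len(t) == len(s):
--                         break
--                     s = t
--                 for c in s:
--                     comp[c] = s
--                 best = max(best, len(s))
--     for i in range(n):
--         for j in range(n):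
--             if grid[i][j] == 0:
--                 counted = set()
--                 total = 1
--                 for c in ((i - 1, j), (i + 1, j), (i, j - 1), (i, j + 1)):
--                     if c in comp and c not in counted:
--                         counted |= comp[c]
--                         total += len(comp[c])
--                 best = max(best, total)
--     return best
-- ===== Notes on version B (the rewrite author's own statement) =====
-- stated objective: alternative
-- what changed: Replaced the explicit-stack DFS labelling with component ids by per-component fixpoint saturation (repeated frontier expansion of a cell set) and, in the 0-flip pass, dedup of neighbouring components by already-counted cells instead of by id.
import Mathlib
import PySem

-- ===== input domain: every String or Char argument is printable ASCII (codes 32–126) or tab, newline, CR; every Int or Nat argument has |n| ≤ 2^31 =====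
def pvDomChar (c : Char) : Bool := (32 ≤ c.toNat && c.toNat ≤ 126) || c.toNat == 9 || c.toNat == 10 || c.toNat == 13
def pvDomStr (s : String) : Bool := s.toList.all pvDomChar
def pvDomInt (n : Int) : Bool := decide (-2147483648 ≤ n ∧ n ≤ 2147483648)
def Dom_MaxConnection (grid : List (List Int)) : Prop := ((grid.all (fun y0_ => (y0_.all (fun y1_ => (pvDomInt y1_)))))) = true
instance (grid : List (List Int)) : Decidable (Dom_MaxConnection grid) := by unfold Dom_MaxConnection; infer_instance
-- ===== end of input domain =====

-- B (MaxConnection_alt) replaces A's explicit-stack DFS with per-component fixpoint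
-- saturation and dedups neighbouring components by already-counted cells instead of by id;
-- a structurally different algorithm with the same result (objective: alternative).
-- Pre_ excludes exactly the ragged grids on which the Python A raises IndexError.

-- ===== PORT A =====
def pvNbrs (c : Int × Int) : List (Int × Int) :=
  [(c.1 - 1, c.2), (c.1 + 1, c.2), (c.1, c.2 - 1), (c.1, c.2 + 1)]

def pvAt (grid : List (List Int)) (x y : Int) : Int :=
  PySem.List.pyGetD (PySem.List.pyGetD grid x []) y 0

def pvIsOne (grid : List (List Int)) (n : Int) (c : Int × Int) : Bool :=
  decide (0 ≤ c.1) && decide (c.1 < n) && decide (0 ≤ c.2) && decide (c.2 < n) &&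
    (pvAt grid c.1 c.2 == 1)

def pvDfs (grid : List (List Int)) (n compId : Int) :
    Nat → List (Int × Int) → PySem.Set (Int × Int) → PySem.Dict (Int × Int) Int → Int →
    Int × PySem.Set (Int × Int) × PySem.Dict (Int × Int) Int
  | _, [], vis, cmap, count => (count, vis, cmap)
  | 0, _ :: _, vis, cmap, count => (count, vis, cmap)
  | fuel + 1, c :: stack, vis, cmap, count =>
      let st := (pvNbrs c).foldl
        (fun t nb =>
          if pvIsOne grid n nb && !(PySem.Set.contains t.2.1 nb) then
            (nb :: t.1, PySem.Set.add t.2.1 nb, PySem.Dict.insert t.2.2 nb compId)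
          else t)
        (stack, vis, cmap)
      pvDfs grid n compId fuel st.1 st.2.1 st.2.2 (count + 1)

def pvDfsCall (grid : List (List Int)) (n compId : Int) (seed : Int × Int)
    (vis : PySem.Set (Int × Int)) (cmap : PySem.Dict (Int × Int) Int) :
    Int × PySem.Set (Int × Int) × PySem.Dict (Int × Int) Int :=
  pvDfs grid n compId ((n * n).toNat + 1) [seed] (PySem.Set.add vis seed)
    (PySem.Dict.insert cmap seed compId) 0

def pvStep1A (grid : List (List Int)) (n : Int)
    (st : PySem.Set (Int × Int) × PySem.Dict Int Int × PySem.Dict (Int × Int) Int × Int)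
    (c : Int × Int) :
    PySem.Set (Int × Int) × PySem.Dict Int Int × PySem.Dict (Int × Int) Int × Int :=
  if (pvAt grid c.1 c.2 == 1) && !(PySem.Set.contains st.1 c) then
    let r := pvDfsCall grid n st.2.2.2 c st.1 st.2.2.1
    (r.2.1, PySem.Dict.insert st.2.1 st.2.2.2 r.1, r.2.2, st.2.2.2 + 1)
  else st

def MaxConnection (grid : List (List Int)) : Int :=
  let n : Int := grid.length
  if n = 0 then 0
  else
    let st := (PySem.List.pyRange 0 n 1).foldl (fun st i =>
        (PySem.List.pyRange 0 n 1).foldl (fun st j => pvStep1A grid n st (i, j)) st)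
      (([] : PySem.Set (Int × Int)), (PySem.Dict.empty : PySem.Dict Int Int),
       (PySem.Dict.empty : PySem.Dict (Int × Int) Int), (0 : Int))
    let maxSize := PySem.List.maxD (PySem.Dict.values st.2.1) (fun v => v) 0
    (PySem.List.pyRange 0 n 1).foldl (fun best i =>
      (PySem.List.pyRange 0 n 1).foldl (fun best j =>
        if pvAt grid i j == 0 then
          let r := (pvNbrs (i, j)).foldl (fun t nb =>
            if pvIsOne grid n nb then
              let cid := PySem.Dict.getD st.2.2.1 nb 0
              if !(PySem.Set.contains t.1 cid) then
                (PySem.Set.add t.1 cid, t.2 + PySem.Dict.getD st.2.1 cid 0)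
              else t
            else t) (([] : PySem.Set Int), (1 : Int))
          max best r.2
        else best) best) maxSize

-- ===== PORT B =====
def pvStepB (grid : List (List Int)) (n : Int) (s : PySem.Set (Int × Int)) :
    PySem.Set (Int × Int) :=
  PySem.Set.union s ((s.flatMap pvNbrs).filter (pvIsOne grid n))

def pvSat (grid : List (List Int)) (n : Int) :
    Nat → PySem.Set (Int × Int) → PySem.Set (Int × Int)
  | 0, s => s
  | fuel + 1, s =>
      let t := pvStepB grid n s
      if t.length = s.length then s else pvSat grid n fuel t

def MaxConnection_alt (grid : List (List Int)) : Int :=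
  let n : Int := grid.length
  let p1 := (PySem.List.pyRange 0 n 1).foldl (fun st i =>
      (PySem.List.pyRange 0 n 1).foldl (fun st j =>
        if (pvAt grid i j == 1) && !(PySem.Dict.contains st.2 (i, j)) then
          let s := pvSat grid n ((n * n).toNat + 1) [(i, j)]
          (max st.1 (s.length : Int), s.foldl (fun d c => PySem.Dict.insert d c s) st.2)
        else st) st)
    ((0 : Int), (PySem.Dict.empty : PySem.Dict (Int × Int) (List (Int × Int))))
  (PySem.List.pyRange 0 n 1).foldl (fun best i =>
    (PySem.List.pyRange 0 n 1).foldl (fun best j =>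
      if pvAt grid i j == 0 then
        let r := (pvNbrs (i, j)).foldl (fun t nb =>
          if PySem.Dict.contains p1.2 nb && !(PySem.Set.contains t.1 nb) then
            (PySem.Set.union t.1 (PySem.Dict.getD p1.2 nb []),
             t.2 + ((PySem.Dict.getD p1.2 nb []).length : Int))
          else t) (([] : PySem.Set (Int × Int)), (1 : Int))
        max best r.2
      else best) best) p1.1

-- ===== PRECONDITION & SPEC =====
-- Pre_ excludes exactly the ragged grids on which the Python A raises IndexError
-- (a row among the n rows shorter than n; A reads grid[i][j] for every i, j < n).
def Pre_MaxConnection (grid : List (List Int)) : Prop :=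
  ∀ r ∈ grid, grid.length ≤ r.length
instance (grid : List (List Int)) : Decidable (Pre_MaxConnection grid) := by
  unfold Pre_MaxConnection; infer_instance

def pvWitness_MaxConnection : List (List Int) := [[1, 0], [0, 1]]

def Spec_MaxConnection (grid : List (List Int)) (out : Int) : Prop := out = MaxConnection_alt grid
instance (grid : List (List Int)) (out : Int) : Decidable (Spec_MaxConnection grid out) := by
  unfold Spec_MaxConnection; infer_instance

-- ===== CLAIM (what is proved, stated in full; the proofs are below) =====
def Claim_equal_MaxConnection : Prop := ∀ (grid : List (List Int)), Dom_MaxConnection grid → Pre_MaxConnection grid → Spec_MaxConnection grid (MaxConnection grid)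

-- ===== LEMMAS AND PROOFS =====
def pvInB (n : Int) (c : Int × Int) : Prop := 0 ≤ c.1 ∧ c.1 < n ∧ 0 ≤ c.2 ∧ c.2 < n

def pvClosed (g : List (List Int)) (n : Int) (S : List (Int × Int)) : Prop :=
  ∀ c ∈ S, ∀ d ∈ pvNbrs c, pvIsOne g n d = true → d ∈ S

def pvC (g : List (List Int)) (n : Int) (c : Int × Int) : List (Int × Int) :=
  pvSat g n ((n * n).toNat + 1) [c]

lemma mem_pvNbrs_symm {c d : Int × Int} (h : c ∈ pvNbrs d) : d ∈ pvNbrs c := by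
  simp [pvNbrs] at h ⊢
  rcases c with ⟨a, b⟩; rcases d with ⟨x, y⟩
  rcases h with h | h | h | h <;> simp_all

lemma pvIsOne_inB {g : List (List Int)} {n : Int} {c : Int × Int}
    (h : pvIsOne g n c = true) : pvInB n c := by
  simp [pvIsOne] at h; exact ⟨h.1.1.1.1, h.1.1.1.2, h.1.1.2, h.1.2⟩

lemma pvIsOne_of_inB {g : List (List Int)} {n : Int} {c : Int × Int}
    (hb : pvInB n c) : pvIsOne g n c = (pvAt g c.1 c.2 == 1) := by
  obtain ⟨h1, h2, h3, h4⟩ := hb; simp [pvIsOne, h1, h2, h3, h4]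

lemma length_le_sq {n : Int} (l : List (Int × Int)) (hnd : l.Nodup)
    (hb : ∀ c ∈ l, pvInB n c) : l.length ≤ n.toNat * n.toNat := by
  have h1 : l.toFinset ⊆ (Finset.Ico (0 : Int) n) ×ˢ (Finset.Ico (0 : Int) n) := by
    intro x hx
    simp only [List.mem_toFinset] at hx
    obtain ⟨a, b, c, d⟩ := hb x hx
    simp [Finset.mem_product]; omega
  have h2 := Finset.card_le_card h1
  rw [List.toFinset_card_of_nodup hnd] at h2
  simpa using h2

lemma mem_pvStepB {g : List (List Int)} {n : Int} {s : PySem.Set (Int × Int)} {x : Int × Int} :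
    x ∈ pvStepB g n s ↔ x ∈ s ∨ ((∃ c ∈ s, x ∈ pvNbrs c) ∧ pvIsOne g n x = true) := by
  rw [pvStepB, PySem.Set.union]
  simp only [PySem.Set.mem_update, List.mem_filter, List.mem_flatMap]

lemma subset_pvStepB {g : List (List Int)} {n : Int} {s : PySem.Set (Int × Int)} :
    ∀ x ∈ s, x ∈ pvStepB g n s := fun x hx => mem_pvStepB.2 (Or.inl hx)

lemma pvStepB_eq_append (g : List (List Int)) (n : Int) (s : PySem.Set (Int × Int)) :
    ∃ r, pvStepB g n s = s ++ r := by
  rw [pvStepB, PySem.Set.union, PySem.Set.update_eq_append_filter]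
  exact ⟨_, rfl⟩

lemma nodup_pvStepB {g : List (List Int)} {n : Int} {s : PySem.Set (Int × Int)}
    (h : s.Nodup) : (pvStepB g n s).Nodup := PySem.Set.nodup_union _ _ h

lemma pvSat_subset {g : List (List Int)} {n : Int} :
    ∀ fuel (s : PySem.Set (Int × Int)), ∀ x ∈ s, x ∈ pvSat g n fuel s := by
  intro fuel
  induction fuel with
  | zero => intro s x hx; simpa [pvSat] using hx
  | succ f ih =>
    intro s x hx
    simp only [pvSat]
    split
    · exact hx
    · exact ih _ _ (subset_pvStepB _ hx)

lemma pvSat_nodup {g : List (List Int)} {n : Int} :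
    ∀ fuel (s : PySem.Set (Int × Int)), s.Nodup → (pvSat g n fuel s).Nodup := by
  intro fuel
  induction fuel with
  | zero => intro s hs; simpa [pvSat] using hs
  | succ f ih =>
    intro s hs
    simp only [pvSat]
    split
    · exact hs
    · exact ih _ (nodup_pvStepB hs)

lemma pvSat_inv {g : List (List Int)} {n : Int} (P : Int × Int → Prop)
    (hstep : ∀ c, P c → ∀ d ∈ pvNbrs c, pvIsOne g n d = true → P d) :
    ∀ fuel (s : PySem.Set (Int × Int)), (∀ c ∈ s, P c) → ∀ x ∈ pvSat g n fuel s, P x := by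
  intro fuel
  induction fuel with
  | zero => intro s hs x hx; exact hs x (by simpa [pvSat] using hx)
  | succ f ih =>
    intro s hs x hx
    simp only [pvSat] at hx
    split at hx
    · exact hs x hx
    · refine ih _ ?_ x hx
      intro c hc
      rcases mem_pvStepB.1 hc with h | ⟨⟨e, he, hce⟩, hone⟩
      · exact hs c h
      · exact hstep e (hs e he) c hce hone

lemma pvSat_fix {g : List (List Int)} {n : Int} :
    ∀ fuel (s : PySem.Set (Int × Int)), s.Nodup → (∀ c ∈ s, pvInB n c) →
      n.toNat * n.toNat < fuel + s.length →
      pvStepB g n (pvSat g n fuel s) = pvSat g n fuel s := by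
  intro fuel
  induction fuel with
  | zero =>
    intro s hnd hb hlt
    exact absurd (length_le_sq s hnd hb) (by omega)
  | succ f ih =>
    intro s hnd hb hlt
    simp only [pvSat]
    split
    · next hlen =>
      obtain ⟨r, hr⟩ := pvStepB_eq_append g n s
      have : r = [] := by
        have := congrArg List.length hr
        simp at this
        exact List.length_eq_zero_iff.1 (by omega)
      rw [hr, this, List.append_nil]
    · next hlen =>
      refine ih _ (nodup_pvStepB hnd) ?_ ?_
      · intro c hc
        rcases mem_pvStepB.1 hc with h | ⟨_, hone⟩
        · exact hb c h
        · exact pvIsOne_inB hone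
      · obtain ⟨r, hr⟩ := pvStepB_eq_append g n s
        have h1 : s.length ≤ (pvStepB g n s).length := by
          rw [hr]; simp
        omega

lemma pvC_mem_self {g : List (List Int)} {n : Int} (c : Int × Int) : c ∈ pvC g n c :=
  pvSat_subset _ _ c (by simp)

lemma pvC_nodup {g : List (List Int)} {n : Int} (c : Int × Int) : (pvC g n c).Nodup :=
  pvSat_nodup _ _ (by simp)

lemma pvC_one {g : List (List Int)} {n : Int} {c : Int × Int}
    (h1 : pvIsOne g n c = true) : ∀ x ∈ pvC g n c, pvIsOne g n x = true :=
  pvSat_inv (fun x => pvIsOne g n x = true) (fun _ _ _ _ hd => hd) _ _ (by simpa)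

lemma pvC_closed {g : List (List Int)} {n : Int} {c : Int × Int} (hn : 0 ≤ n)
    (hb : pvInB n c) : pvClosed g n (pvC g n c) := by
  intro x hx d hd hone
  have hfix : pvStepB g n (pvC g n c) = pvC g n c := by
    refine pvSat_fix _ _ (by simp) (by simpa using hb) ?_
    have : (n * n).toNat = n.toNat * n.toNat := Int.toNat_mul hn hn
    omega
  rw [← hfix]
  exact mem_pvStepB.2 (Or.inr ⟨⟨x, hx, hd⟩, hone⟩)

lemma nodup_length_le {α : Type} [DecidableEq α] {l1 l2 : List α}
    (h : l1.Nodup) (hs : ∀ x ∈ l1, x ∈ l2) : l1.length ≤ l2.length := by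
  calc l1.length = l1.toFinset.card := (List.toFinset_card_of_nodup h).symm
  _ ≤ l2.toFinset.card := Finset.card_le_card (by intro x hx; simp at hx ⊢; exact hs x hx)
  _ ≤ l2.length := l2.toFinset_card_le

lemma nodup_append_of {α : Type} {l1 l2 : List α}
    (h1 : l1.Nodup) (h2 : l2.Nodup) (h : ∀ x ∈ l2, x ∉ l1) : (l1 ++ l2).Nodup := by
  rw [List.nodup_append]
  refine ⟨h1, h2, ?_⟩
  intro x hx y hy hxy
  exact h y hy (hxy ▸ hx)

lemma nodup_append_singleton {α : Type} {l : List α} {a : α}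
    (h : l.Nodup) (hn : a ∉ l) : (l ++ [a]).Nodup :=
  nodup_append_of h (List.nodup_singleton _) (by intro x hx; simp at hx; exact hx ▸ hn)

lemma pvPush_spec (g : List (List Int)) (n cid : Int) (V C : List (Int × Int))
    (cmap₀ : PySem.Dict (Int × Int) Int) :
    ∀ (nbs stack Δ : List (Int × Int)) (cmap : PySem.Dict (Int × Int) Int),
    (∀ nb ∈ nbs, pvIsOne g n nb = true → nb ∈ C) →
    Δ.Nodup → (∀ x ∈ Δ, x ∈ C) →
    (∀ x, cmap.get? x = if x ∈ Δ then some cid else cmap₀.get? x) →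
    ∃ (new : List (Int × Int)) (cmap' : PySem.Dict (Int × Int) Int),
      (nbs.foldl (fun t nb =>
          if pvIsOne g n nb && !(PySem.Set.contains t.2.1 nb) then
            (nb :: t.1, PySem.Set.add t.2.1 nb, PySem.Dict.insert t.2.2 nb cid)
          else t) (stack, (V ++ Δ : PySem.Set (Int × Int)), cmap))
        = (new ++ stack, (V ++ (Δ ++ new.reverse) : PySem.Set (Int × Int)), cmap') ∧
      new.Nodup ∧ (∀ x ∈ new, x ∈ C ∧ x ∉ Δ) ∧
      (∀ nb ∈ nbs, pvIsOne g n nb = true → nb ∈ V ++ (Δ ++ new.reverse)) ∧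
      (∀ x, cmap'.get? x = if x ∈ Δ ++ new.reverse then some cid else cmap₀.get? x) := by
  intro nbs
  induction nbs with
  | nil =>
    intro stack Δ cmap _ hΔnd hΔC hcm
    exact ⟨[], cmap, by simp, by simp, by simp, by simp, by simpa using hcm⟩
  | cons nb nbs ih =>
    intro stack Δ cmap hnbs hΔnd hΔC hcm
    simp only [List.foldl_cons]
    by_cases hone : pvIsOne g n nb = true
    · by_cases hmem : nb ∈ V ++ Δ
      · have hguard : (pvIsOne g n nb && !(PySem.Set.contains (V ++ Δ : PySem.Set (Int × Int)) nb)) = false := by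
          have h : PySem.Set.contains (V ++ Δ : PySem.Set (Int × Int)) nb = true :=
            (PySem.Set.contains_iff _ _).2 hmem
          rw [h]; simp
        rw [hguard]
        simp only [Bool.false_eq_true, if_false]
        obtain ⟨new, cmap', heq, h1, h2, h3, h4⟩ :=
          ih stack Δ cmap (fun a ha => hnbs a (by simp [ha])) hΔnd hΔC hcm
        refine ⟨new, cmap', heq, h1, h2, ?_, h4⟩
        intro a ha hone'
        rcases List.mem_cons.1 ha with rfl | ha'
        · rcases List.mem_append.1 hmem with h | h
          · exact List.mem_append.2 (Or.inl h)
          · exact List.mem_append.2 (Or.inr (List.mem_append.2 (Or.inl h)))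
        · exact h3 a ha' hone'
      · have hguard : (pvIsOne g n nb && !(PySem.Set.contains (V ++ Δ : PySem.Set (Int × Int)) nb)) = true := by
          have : PySem.Set.contains (V ++ Δ : PySem.Set (Int × Int)) nb = false := by
            cases hc : PySem.Set.contains (V ++ Δ : PySem.Set (Int × Int)) nb
            · rfl
            · exact absurd ((PySem.Set.contains_iff _ _).1 hc) hmem
          rw [this]; simp [hone]
        rw [hguard]
        simp only [if_pos rfl, if_true]
        have hadd : PySem.Set.add (V ++ Δ : PySem.Set (Int × Int)) nb = V ++ (Δ ++ [nb]) := by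
          rw [PySem.Set.add_of_not_mem hmem, List.append_assoc]
        have hnbΔ : nb ∉ Δ := fun h => hmem (List.mem_append.2 (Or.inr h))
        have hnd1 : (Δ ++ [nb]).Nodup := nodup_append_singleton hΔnd hnbΔ
        have hC1 : ∀ x ∈ Δ ++ [nb], x ∈ C := by
          intro x hx
          rcases List.mem_append.1 hx with h | h
          · exact hΔC x h
          · have hx : x = nb := by simpa using h
            rw [hx]; exact hnbs nb (by simp) hone
        have hcm1 : ∀ x, (PySem.Dict.insert cmap nb cid).get? x =
            if x ∈ Δ ++ [nb] then some cid else cmap₀.get? x := by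
          intro x
          rw [PySem.Dict.get?_insert]
          by_cases hx : x = nb
          · subst hx; simp
          · rw [if_neg hx, hcm x]
            by_cases hxΔ : x ∈ Δ <;> simp [hxΔ, hx]
        rw [hadd]
        obtain ⟨new, cmap', heq, h1, h2, h3, h4⟩ :=
          ih (nb :: stack) (Δ ++ [nb]) (PySem.Dict.insert cmap nb cid)
            (fun a ha => hnbs a (by simp [ha])) hnd1 hC1 hcm1
        refine ⟨new ++ [nb], cmap', ?_, ?_, ?_, ?_, ?_⟩
        · rw [heq]
          simp [List.append_assoc]
        · have hnbnew : nb ∉ new := by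
            intro h
            exact (h2 nb h).2 (by simp)
          exact nodup_append_singleton h1 hnbnew
        · intro x hx
          rcases List.mem_append.1 hx with h | h
          · have := h2 x h
            exact ⟨this.1, fun hh => this.2 (by simp [hh])⟩
          · have hx2 : x = nb := by simpa using h
            rw [hx2]
            exact ⟨hnbs nb (by simp) hone, hnbΔ⟩
        · intro a ha hone'
          rcases List.mem_cons.1 ha with rfl | ha'
          · simp [List.mem_append]
          · have := h3 a ha' hone'
            simp [List.mem_append] at this ⊢
            tauto
        · intro x
          rw [h4 x]
          by_cases hx : x ∈ Δ ++ [nb] ++ new.reverse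
          · rw [if_pos hx, if_pos (by simp [List.mem_append] at hx ⊢; tauto)]
          · rw [if_neg hx, if_neg (by simp [List.mem_append] at hx ⊢; tauto)]
    · have hguard : (pvIsOne g n nb && !(PySem.Set.contains (V ++ Δ : PySem.Set (Int × Int)) nb)) = false := by
        simp [hone]
      rw [hguard]
      simp only [Bool.false_eq_true, if_false]
      obtain ⟨new, cmap', heq, h1, h2, h3, h4⟩ :=
        ih stack Δ cmap (fun a ha => hnbs a (by simp [ha])) hΔnd hΔC hcm
      refine ⟨new, cmap', heq, h1, h2, ?_, h4⟩
      intro a ha hone'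
      rcases List.mem_cons.1 ha with rfl | ha'
      · exact absurd hone' hone
      · exact h3 a ha' hone'

lemma pvDfs_spec (g : List (List Int)) (n cid : Int) (V C : List (Int × Int))
    (cmap₀ : PySem.Dict (Int × Int) Int)
    (hCnd : C.Nodup) (hCcl : pvClosed g n C) :
    ∀ fuel (stack Δ : List (Int × Int)) (cmap : PySem.Dict (Int × Int) Int) (count : Int),
    stack.Nodup → (∀ x ∈ stack, x ∈ Δ) → Δ.Nodup → (∀ x ∈ Δ, x ∈ C) →
    (∀ c ∈ Δ, c ∉ stack → ∀ d ∈ pvNbrs c, pvIsOne g n d = true → d ∈ V ++ Δ) →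
    count + stack.length = Δ.length →
    stack.length + (C.length - Δ.length) ≤ fuel →
    (∀ x, cmap.get? x = if x ∈ Δ then some cid else cmap₀.get? x) →
    ∃ (Δf : List (Int × Int)) (cmapf : PySem.Dict (Int × Int) Int),
      pvDfs g n cid fuel stack (V ++ Δ) cmap count = ((Δf.length : Int), V ++ Δf, cmapf) ∧
      (∀ x ∈ Δ, x ∈ Δf) ∧ Δf.Nodup ∧ (∀ x ∈ Δf, x ∈ C) ∧
      (∀ c ∈ Δf, ∀ d ∈ pvNbrs c, pvIsOne g n d = true → d ∈ V ++ Δf) ∧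
      (∀ x, cmapf.get? x = if x ∈ Δf then some cid else cmap₀.get? x) := by
  intro fuel
  induction fuel with
  | zero =>
    intro stack Δ cmap count hsnd hsΔ hΔnd hΔC hdone hcount hfuel hcm
    have hstack : stack = [] := by
      cases stack with
      | nil => rfl
      | cons a t => simp at hfuel
    subst hstack
    refine ⟨Δ, cmap, ?_, fun x hx => hx, hΔnd, hΔC, ?_, hcm⟩
    · simp only [pvDfs]
      have : count = (Δ.length : Int) := by simpa using hcount
      rw [this]
    · intro c hc d hd hone
      exact hdone c hc (by simp) d hd hone
  | succ fuel ih =>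
    intro stack Δ cmap count hsnd hsΔ hΔnd hΔC hdone hcount hfuel hcm
    cases stack with
    | nil =>
      refine ⟨Δ, cmap, ?_, fun x hx => hx, hΔnd, hΔC, ?_, hcm⟩
      · simp only [pvDfs]
        have : count = (Δ.length : Int) := by simpa using hcount
        rw [this]
      · intro c hc d hd hone
        exact hdone c hc (by simp) d hd hone
    | cons c stack =>
      have hcΔ : c ∈ Δ := hsΔ c (by simp)
      have hcC : c ∈ C := hΔC c hcΔ
      obtain ⟨new, cmap', heq, hnnd, hnew, hnbrs, hcm'⟩ :=
        pvPush_spec g n cid V C cmap₀ (pvNbrs c) stack Δ cmap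
          (fun nb hnb hone => hCcl c hcC nb hnb hone) hΔnd hΔC hcm
      have hcstack : c ∉ stack := by
        have := hsnd; simp [List.nodup_cons] at this; exact this.1
      have hnΔ1 : (Δ ++ new.reverse).Nodup :=
        nodup_append_of hΔnd (by simpa using hnnd)
          (fun x hx => (hnew x (by simpa using hx)).2)
      have hΔ1C : ∀ x ∈ Δ ++ new.reverse, x ∈ C := by
        intro x hx
        rcases List.mem_append.1 hx with h | h
        · exact hΔC x h
        · exact (hnew x (by simpa using h)).1
      have hs1nd : (new ++ stack).Nodup :=
        nodup_append_of hnnd (hsnd.of_cons)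
          (fun x hx hxn => (hnew x hxn).2 (hsΔ x (by simp [hx])))
      have hs1Δ : ∀ x ∈ new ++ stack, x ∈ Δ ++ new.reverse := by
        intro x hx
        rcases List.mem_append.1 hx with h | h
        · exact List.mem_append.2 (Or.inr (by simpa using h))
        · exact List.mem_append.2 (Or.inl (hsΔ x (by simp [h])))
      have hdone1 : ∀ c' ∈ Δ ++ new.reverse, c' ∉ new ++ stack →
          ∀ d ∈ pvNbrs c', pvIsOne g n d = true → d ∈ V ++ (Δ ++ new.reverse) := by
        intro c' hc' hns d hd hone
        rcases List.mem_append.1 hc' with hcΔ' | hcn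
        · by_cases hcc : c' = c
          · subst hcc
            exact hnbrs d hd hone
          · have hc'stack : c' ∉ stack := fun h => hns (List.mem_append.2 (Or.inr h))
            have := hdone c' hcΔ' (by simp [hcc, hc'stack]) d hd hone
            rcases List.mem_append.1 this with h | h
            · exact List.mem_append.2 (Or.inl h)
            · exact List.mem_append.2 (Or.inr (List.mem_append.2 (Or.inl h)))
        · exact absurd (List.mem_append.2 (Or.inl (by simpa using hcn))) hns
      have hΔlen : Δ.length ≤ C.length := nodup_length_le hΔnd hΔC
      have hΔ1len : (Δ ++ new.reverse).length ≤ C.length := nodup_length_le hnΔ1 hΔ1C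
      have hcount1 : (count + 1) + ((new ++ stack).length : Int) =
          ((Δ ++ new.reverse).length : Int) := by
        simp only [List.length_append, List.length_cons, List.length_reverse] at hcount ⊢
        push_cast at hcount ⊢
        omega
      have hfuel1 : (new ++ stack).length + (C.length - (Δ ++ new.reverse).length) ≤ fuel := by
        simp only [List.length_append, List.length_cons, List.length_reverse] at hfuel hΔ1len hΔlen ⊢
        omega
      obtain ⟨Δf, cmapf, hres, hsub, hfnd, hfC, hfcl, hfcm⟩ :=
        ih (new ++ stack) (Δ ++ new.reverse) cmap' (count + 1)
          hs1nd hs1Δ hnΔ1 hΔ1C hdone1 hcount1 hfuel1 hcm'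
      refine ⟨Δf, cmapf, ?_, ?_, hfnd, hfC, hfcl, hfcm⟩
      · simp only [pvDfs]
        rw [heq]
        exact hres
      · intro x hx
        exact hsub x (List.mem_append.2 (Or.inl hx))

def pvIdx (Ls : List (List (Int × Int))) (x : Int × Int) : Option Int :=
  (Ls.findIdx? (fun L => decide (x ∈ L))).map (fun k => (k : Int))

structure RefInv (g : List (List Int)) (n : Int) (Ls : List (List (Int × Int))) : Prop where
  nodup : ∀ L ∈ Ls, L.Nodup
  one : ∀ L ∈ Ls, ∀ x ∈ L, pvIsOne g n x = true
  closed : ∀ L ∈ Ls, pvClosed g n L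
  disj : Ls.Pairwise (fun L M => ∀ x : Int × Int, ¬(x ∈ L ∧ x ∈ M))

lemma refInv_nil (g : List (List Int)) (n : Int) : RefInv g n [] :=
  ⟨by simp, by simp, by simp, by simp⟩

lemma flatten_closed {g : List (List Int)} {n : Int} {Ls : List (List (Int × Int))}
    (hInv : RefInv g n Ls) : pvClosed g n Ls.flatten := by
  intro c hc d hd hone
  obtain ⟨L, hL, hcL⟩ := List.mem_flatten.1 hc
  exact List.mem_flatten.2 ⟨L, hL, hInv.closed L hL c hcL d hd hone⟩

lemma fresh_class {g : List (List Int)} {n : Int} {Ls : List (List (Int × Int))}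
    {c : Int × Int} (hInv : RefInv g n Ls) (hone : pvIsOne g n c = true)
    (hfresh : c ∉ Ls.flatten) : ∀ x ∈ pvC g n c, x ∉ Ls.flatten := by
  have := pvSat_inv (g := g) (n := n)
    (fun x => pvIsOne g n x = true ∧ x ∉ Ls.flatten) ?_ ((n * n).toNat + 1) [c]
    (by intro x hx; simp at hx; subst hx; exact ⟨hone, hfresh⟩)
  · exact fun x hx => (this x hx).2
  · rintro x ⟨hx1, hx2⟩ d hd hdone
    refine ⟨hdone, fun hdf => ?_⟩
    obtain ⟨L, hL, hdL⟩ := List.mem_flatten.1 hdf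
    exact hx2 (List.mem_flatten.2 ⟨L, hL, hInv.closed L hL d hdL x (mem_pvNbrs_symm hd) hx1⟩)

lemma refInv_append {g : List (List Int)} {n : Int} {Ls : List (List (Int × Int))}
    {c : Int × Int} (hn : 0 ≤ n) (hInv : RefInv g n Ls) (hone : pvIsOne g n c = true)
    (hfresh : c ∉ Ls.flatten) : RefInv g n (Ls ++ [pvC g n c]) := by
  have hfc := fresh_class hInv hone hfresh
  refine ⟨?_, ?_, ?_, ?_⟩
  · intro L hL
    rcases List.mem_append.1 hL with h | h
    · exact hInv.nodup L h
    · simp at h; subst h; exact pvC_nodup c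
  · intro L hL
    rcases List.mem_append.1 hL with h | h
    · exact hInv.one L h
    · simp at h; subst h; exact pvC_one hone
  · intro L hL
    rcases List.mem_append.1 hL with h | h
    · exact hInv.closed L h
    · simp at h; subst h; exact pvC_closed hn (pvIsOne_inB hone)
  · rw [List.pairwise_append]
    refine ⟨hInv.disj, by simp, ?_⟩
    intro L hL M hM
    have hM' : M = pvC g n c := by simpa using hM
    subst hM'
    rintro x ⟨hxL, hxM⟩
    exact hfc x hxM (List.mem_flatten.2 ⟨L, hL, hxL⟩)

lemma class_unique {g : List (List Int)} {n : Int} {Ls : List (List (Int × Int))}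
    {x : Int × Int} {k k' : Nat} {L L' : List (Int × Int)}
    (hInv : RefInv g n Ls) (h1 : Ls[k]? = some L) (h2 : x ∈ L)
    (h3 : Ls[k']? = some L') (h4 : x ∈ L') : k = k' := by
  by_contra hne
  have hk : k < Ls.length := List.getElem?_eq_some_iff.1 h1 |>.1
  have hk' : k' < Ls.length := List.getElem?_eq_some_iff.1 h3 |>.1
  have hL : Ls[k] = L := by simpa [List.getElem?_eq_getElem hk] using h1
  have hL' : Ls[k'] = L' := by simpa [List.getElem?_eq_getElem hk'] using h3
  have hpw := List.pairwise_iff_getElem.1 hInv.disj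
  rcases Nat.lt_or_ge k k' with h | h
  · exact hpw k k' hk hk' h x ⟨hL ▸ h2, hL' ▸ h4⟩
  · have : k' < k := by omega
    exact hpw k' k hk' hk this x ⟨hL' ▸ h4, hL ▸ h2⟩

lemma pvIdx_eq_some_of {g : List (List Int)} {n : Int} {Ls : List (List (Int × Int))}
    {x : Int × Int} {k : Nat} {L : List (Int × Int)}
    (hInv : RefInv g n Ls) (hk : Ls[k]? = some L) (hx : x ∈ L) :
    pvIdx Ls x = some (k : Int) := by
  have hkl : k < Ls.length := List.getElem?_eq_some_iff.1 hk |>.1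
  have hL : Ls[k] = L := by simpa [List.getElem?_eq_getElem hkl] using hk
  have hex : ∃ M ∈ Ls, (fun M => decide (x ∈ M)) M = true :=
    ⟨L, by rw [← hL]; exact List.getElem_mem hkl, by simpa using hx⟩
  obtain ⟨j, hj⟩ : ∃ j, Ls.findIdx? (fun M => decide (x ∈ M)) = some j := by
    rcases h : Ls.findIdx? (fun M => decide (x ∈ M)) with _ | j
    · rw [List.findIdx?_eq_none_iff] at h
      obtain ⟨M, hM1, hM2⟩ := hex
      have h2 := h M hM1
      simp at hM2 h2
      exact absurd hM2 h2
    · exact ⟨j, rfl⟩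
  obtain ⟨hjl, hjp, _⟩ := List.findIdx?_eq_some_iff_getElem.1 hj
  have hjk : j = k :=
    class_unique hInv (List.getElem?_eq_getElem hjl) (by simpa using hjp) hk hx
  rw [pvIdx, hj, hjk]
  rfl

lemma pvIdx_eq_none_iff {Ls : List (List (Int × Int))} {x : Int × Int} :
    pvIdx Ls x = none ↔ x ∉ Ls.flatten := by
  rw [show pvIdx Ls x = (Ls.findIdx? (fun L => decide (x ∈ L))).map (fun k => (k : Int)) from rfl]
  rcases h : Ls.findIdx? (fun L => decide (x ∈ L)) with _ | j
  · rw [List.findIdx?_eq_none_iff] at h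
    refine iff_of_true rfl ?_
    intro hf
    obtain ⟨L, hL, hxL⟩ := List.mem_flatten.1 hf
    have := h L hL
    simp at this
    exact this hxL
  · obtain ⟨hj, hp, _⟩ := List.findIdx?_eq_some_iff_getElem.1 h
    have hx : x ∈ Ls.flatten :=
      List.mem_flatten.2 ⟨_, List.getElem_mem hj, by simpa using hp⟩
    exact iff_of_false (by simp) (by simp [hx])

lemma find?_class_of {g : List (List Int)} {n : Int} {Ls : List (List (Int × Int))}
    {x : Int × Int} {k : Nat} {L : List (Int × Int)}
    (hInv : RefInv g n Ls) (hk : Ls[k]? = some L) (hx : x ∈ L) :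
    Ls.find? (fun M => decide (x ∈ M)) = some L := by
  have hkl : k < Ls.length := List.getElem?_eq_some_iff.1 hk |>.1
  have hL : Ls[k] = L := by simpa [List.getElem?_eq_getElem hkl] using hk
  rcases h : Ls.find? (fun M => decide (x ∈ M)) with _ | M
  · rw [List.find?_eq_none] at h
    have := h L (by rw [← hL]; exact List.getElem_mem hkl)
    simp at this
    exact absurd hx this
  · have hM : M ∈ Ls := List.mem_of_find?_eq_some h
    have hxM : x ∈ M := by simpa using List.find?_some h
    obtain ⟨j, hj⟩ := List.mem_iff_getElem?.1 hM
    have := class_unique hInv hj hxM hk hx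
    subst this
    rw [hj] at hk
    simp at hk
    rw [hk]

def pvRefStep (g : List (List Int)) (n : Int) (Ls : List (List (Int × Int)))
    (c : Int × Int) : List (List (Int × Int)) :=
  if pvIsOne g n c = true ∧ c ∉ Ls.flatten then Ls ++ [pvC g n c] else Ls

-- the unique-class membership of the final dfs delta: it is exactly pvC

lemma dfs_delta_eq_pvC {g : List (List Int)} {n : Int} {V C Δf : List (Int × Int)}
    {c : Int × Int}
    (hone : pvIsOne g n c = true) (hcV : c ∉ V) (hVcl : pvClosed g n V)
    (hCdef : C = pvC g n c) (hcΔf : c ∈ Δf) (hΔfC : ∀ x ∈ Δf, x ∈ C)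
    (hfcl : ∀ x ∈ Δf, ∀ d ∈ pvNbrs x, pvIsOne g n d = true → d ∈ V ++ Δf) :
    ∀ x ∈ C, x ∈ Δf := by
  have hsub1 : ∀ x ∈ C, x ∈ V ∨ x ∈ Δf := by
    subst hCdef
    refine pvSat_inv (fun x => x ∈ V ∨ x ∈ Δf) ?_ _ _ (by simpa using Or.inr hcΔf)
    rintro x (hx | hx) d hd hone'
    · exact Or.inl (hVcl x hx d hd hone')
    · rcases List.mem_append.1 (hfcl x hx d hd hone') with h | h
      · exact Or.inl h
      · exact Or.inr h
  have hsub2 : ∀ x ∈ C, x ∉ V := by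
    subst hCdef
    have := pvSat_inv (g := g) (n := n)
      (fun x => pvIsOne g n x = true ∧ x ∉ V) ?_ ((n * n).toNat + 1) [c]
      (by intro x hx; simp at hx; subst hx; exact ⟨hone, hcV⟩)
    · exact fun x hx => (this x hx).2
    · rintro x ⟨hx1, hx2⟩ d hd hone'
      refine ⟨hone', fun hdV => hx2 (hVcl d hdV x (mem_pvNbrs_symm hd) hx1)⟩
  intro x hx
  rcases hsub1 x hx with h | h
  · exact absurd h (hsub2 x hx)
  · exact h

lemma pvIdx_append_of_not_mem {g : List (List Int)} {n : Int}
    {Ls : List (List (Int × Int))} {C : List (Int × Int)} {x : Int × Int}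
    (hInv : RefInv g n Ls) (hInv' : RefInv g n (Ls ++ [C])) (hx : x ∉ C) :
    pvIdx (Ls ++ [C]) x = pvIdx Ls x := by
  rcases h : pvIdx Ls x with _ | k
  · rw [pvIdx_eq_none_iff] at h
    rw [pvIdx_eq_none_iff]
    intro hf
    rcases List.mem_flatten.1 hf with ⟨L, hL, hxL⟩
    rcases List.mem_append.1 hL with h1 | h1
    · exact h (List.mem_flatten.2 ⟨L, h1, hxL⟩)
    · simp at h1; subst h1; exact hx hxL
  · rcases hj : Ls.findIdx? (fun L => decide (x ∈ L)) with _ | j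
    · rw [pvIdx, hj] at h; cases h
    · have hk : (j : Int) = k := by
        rw [pvIdx, hj] at h
        simpa using h
      obtain ⟨hjl, hjp, _⟩ := List.findIdx?_eq_some_iff_getElem.1 hj
      have := pvIdx_eq_some_of hInv' (k := j) (L := Ls[j])
        (List.getElem?_append_left hjl ▸ List.getElem?_eq_getElem hjl)
        (by simpa using hjp)
      rw [this, hk]

structure AInv (g : List (List Int)) (n : Int) (Ls : List (List (Int × Int)))
    (st : PySem.Set (Int × Int) × PySem.Dict Int Int × PySem.Dict (Int × Int) Int × Int) :
    Prop where
  ref : RefInv g n Ls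
  vis : ∀ x, x ∈ st.1 ↔ x ∈ Ls.flatten
  cmap : ∀ x, st.2.2.1.get? x = pvIdx Ls x
  csize : st.2.1.items = PySem.List.enumerate (Ls.map (fun L => (L.length : Int))) 0
  cid : st.2.2.2 = (Ls.length : Int)

lemma stepA {g : List (List Int)} {n : Int} {Ls : List (List (Int × Int))}
    {st : PySem.Set (Int × Int) × PySem.Dict Int Int × PySem.Dict (Int × Int) Int × Int}
    {c : Int × Int} (hn : 0 ≤ n) (hb : pvInB n c) (hInv : AInv g n Ls st) :
    AInv g n (pvRefStep g n Ls c) (pvStep1A g n st c) := by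
  by_cases hguard : pvIsOne g n c = true ∧ c ∉ Ls.flatten
  · -- fresh seed: a new component is discovered
    obtain ⟨hone, hfresh⟩ := hguard
    have hcvis : c ∉ st.1 := fun h => hfresh ((hInv.vis c).1 h)
    have hgA : ((pvAt g c.1 c.2 == 1) && !(PySem.Set.contains st.1 c)) = true := by
      have h1 : PySem.Set.contains st.1 c = false := by
        cases hc : PySem.Set.contains st.1 c
        · rfl
        · exact absurd ((PySem.Set.contains_iff _ _).1 hc) hcvis
      rw [h1]
      rw [pvIsOne_of_inB hb] at hone
      simp [hone]
    rw [pvStep1A, hgA, pvRefStep, if_pos ⟨hone, hfresh⟩]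
    simp only [if_true]
    set C := pvC g n c with hC
    have hCnd : C.Nodup := pvC_nodup c
    have hCone : ∀ x ∈ C, pvIsOne g n x = true := pvC_one hone
    have hCcl : pvClosed g n C := pvC_closed hn (pvIsOne_inB hone)
    have hClen : C.length ≤ (n * n).toNat := by
      have := length_le_sq (n := n) C hCnd (fun x hx => pvIsOne_inB (hCone x hx))
      have h2 : (n * n).toNat = n.toNat * n.toNat := Int.toNat_mul hn hn
      omega
    have hCpos : 0 < C.length := List.length_pos_of_mem (pvC_mem_self c)
    have hVcl : pvClosed g n st.1 := by
      intro x hx d hd hone'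
      exact (hInv.vis d).2 (flatten_closed hInv.ref x ((hInv.vis x).1 hx) d hd hone')
    have hadd : PySem.Set.add st.1 c = st.1 ++ [c] := PySem.Set.add_of_not_mem hcvis
    obtain ⟨Δf, cmapf, hres, hsub, hfnd, hfC, hfcl, hfcm⟩ :=
      pvDfs_spec g n st.2.2.2 st.1 C st.2.2.1 hCnd hCcl ((n * n).toNat + 1)
        [c] [c] (PySem.Dict.insert st.2.2.1 c st.2.2.2) 0
        (List.nodup_singleton c) (fun x hx => hx) (List.nodup_singleton c)
        (by intro x hx; rw [List.mem_singleton] at hx; rw [hx]; exact pvC_mem_self c)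
        (by intro x hx hns; rw [List.mem_singleton] at hx; exact absurd (by simp [hx]) hns)
        (by simp)
        (by simp only [List.length_singleton]; omega)
        (by intro x; rw [PySem.Dict.get?_insert]; simp only [List.mem_singleton])
    have hCsub : ∀ x ∈ C, x ∈ Δf :=
      dfs_delta_eq_pvC hone hcvis hVcl hC (hsub c (by simp)) hfC hfcl
    have hmemCΔ : ∀ x, x ∈ Δf ↔ x ∈ C := fun x => ⟨hfC x, hCsub x⟩
    have hlen : Δf.length = C.length :=
      le_antisymm (nodup_length_le hfnd hfC) (nodup_length_le hCnd hCsub)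
    have hInv' : RefInv g n (Ls ++ [C]) := refInv_append hn hInv.ref hone hfresh
    have hgetC : (Ls ++ [C])[Ls.length]? = some C := by
      rw [List.getElem?_append_right (le_refl _)]
      simp
    refine ⟨hInv', ?_, ?_, ?_, ?_⟩
    · -- visited = flatten
      intro x
      rw [show (pvDfsCall g n st.2.2.2 c st.1 st.2.2.1) =
        pvDfs g n st.2.2.2 ((n * n).toNat + 1) [c] (PySem.Set.add st.1 c)
          (PySem.Dict.insert st.2.2.1 c st.2.2.2) 0 from rfl, hadd, hres]
      simp only [List.mem_append, List.flatten_append, List.flatten_cons,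
        List.flatten_nil, List.append_nil]
      rw [hInv.vis x, hmemCΔ x]
    · -- component_map = pvIdx
      intro x
      rw [show (pvDfsCall g n st.2.2.2 c st.1 st.2.2.1) =
        pvDfs g n st.2.2.2 ((n * n).toNat + 1) [c] (PySem.Set.add st.1 c)
          (PySem.Dict.insert st.2.2.1 c st.2.2.2) 0 from rfl, hadd, hres]
      simp only []
      rw [hfcm x]
      by_cases hx : x ∈ Δf
      · rw [if_pos hx, pvIdx_eq_some_of hInv' hgetC ((hmemCΔ x).1 hx), hInv.cid]
      · rw [if_neg hx, hInv.cmap x,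
          pvIdx_append_of_not_mem hInv.ref hInv' (fun h => hx ((hmemCΔ x).2 h))]
    · -- component_size items
      rw [show (pvDfsCall g n st.2.2.2 c st.1 st.2.2.1) =
        pvDfs g n st.2.2.2 ((n * n).toNat + 1) [c] (PySem.Set.add st.1 c)
          (PySem.Dict.insert st.2.2.1 c st.2.2.2) 0 from rfl, hadd, hres]
      simp only []
      have hnc : st.2.1.contains st.2.2.2 = false := by
        cases hcont : st.2.1.contains st.2.2.2
        · rfl
        · exfalso
          have hmem := (PySem.Dict.contains_iff_mem_keys _ _).1 hcont
          have hkeys : st.2.1.keys = List.map (fun x => x.1) st.2.1.items := rfl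
          rw [hkeys, hInv.csize, PySem.List.map_fst_enumerate, hInv.cid] at hmem
          simp only [PySem.List.mem_pyRange_one] at hmem
          simp at hmem
      rw [PySem.Dict.items_insert_of_not_contains _ _ hnc, hInv.csize]
      rw [show (Ls ++ [C]).map (fun L => (L.length : Int)) =
        Ls.map (fun L => (L.length : Int)) ++ [(C.length : Int)] by simp]
      rw [PySem.List.enumerate_append]
      congr 1
      simp [hInv.cid, hlen]
    · -- next id
      rw [hInv.cid]
      simp
  · -- seed already classified or not a 1: nothing changes
    have hgA : ((pvAt g c.1 c.2 == 1) && !(PySem.Set.contains st.1 c)) = false := by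
      rw [← pvIsOne_of_inB (g := g) hb]
      rcases Decidable.not_and_iff_not_or_not.1 hguard with h | h
      · simp [h]
      · have hcvis : c ∈ st.1 := (hInv.vis c).2 (Decidable.not_not.1 h)
        rw [(PySem.Set.contains_iff _ _).2 hcvis]
        simp
    rw [pvStep1A, hgA, pvRefStep, if_neg hguard]
    simp only [Bool.false_eq_true, if_false]
    exact hInv

lemma A_phase1 {g : List (List Int)} {n : Int} (hn : 0 ≤ n) :
    ∀ (scan : List (Int × Int)) (Ls : List (List (Int × Int)))
      (st : PySem.Set (Int × Int) × PySem.Dict Int Int × PySem.Dict (Int × Int) Int × Int),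
    (∀ c ∈ scan, pvInB n c) → AInv g n Ls st →
    AInv g n (scan.foldl (pvRefStep g n) Ls) (scan.foldl (pvStep1A g n) st) := by
  intro scan
  induction scan with
  | nil => intro Ls st _ h; exact h
  | cons c scan ih =>
    intro Ls st hb h
    exact ih _ _ (fun d hd => hb d (by simp [hd])) (stepA hn (hb c (by simp)) h)

lemma get?_foldl_insert_const {v : List (Int × Int)} {x : Int × Int} :
    ∀ (l : List (Int × Int)) (d : PySem.Dict (Int × Int) (List (Int × Int))),
    (l.foldl (fun d c => d.insert c v) d).get? x = if x ∈ l then some v else d.get? x := by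
  intro l
  induction l with
  | nil => intro d; simp
  | cons a l ih =>
    intro d
    rw [List.foldl_cons, ih]
    by_cases hx : x ∈ l
    · simp [hx]
    · rcases eq_or_ne x a with rfl | hne
      · simp [hx, PySem.Dict.get?_insert]
      · simp [hx, hne, PySem.Dict.get?_insert]

structure BInv (g : List (List Int)) (n : Int) (Ls : List (List (Int × Int)))
    (st : Int × PySem.Dict (Int × Int) (List (Int × Int))) : Prop where
  ref : RefInv g n Ls
  best : st.1 = (Ls.map (fun L => (L.length : Int))).foldl max 0
  comp : ∀ x, st.2.get? x = Ls.find? (fun L => decide (x ∈ L))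

lemma find?_isSome_iff_flatten {Ls : List (List (Int × Int))} {x : Int × Int} :
    (Ls.find? (fun L => decide (x ∈ L))).isSome = true ↔ x ∈ Ls.flatten := by
  rcases h : Ls.find? (fun L => decide (x ∈ L)) with _ | L
  · rw [List.find?_eq_none] at h
    simp only [Option.isSome_none]
    constructor
    · intro hh; cases hh
    · intro hf
      obtain ⟨L, hL, hxL⟩ := List.mem_flatten.1 hf
      have := h L hL; simp at this; exact absurd hxL this
  · simp only [Option.isSome_some, true_iff]
    exact List.mem_flatten.2 ⟨L, List.mem_of_find?_eq_some h,
      by simpa using List.find?_some h⟩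

def pvStep1B (g : List (List Int)) (n : Int)
    (st : Int × PySem.Dict (Int × Int) (List (Int × Int))) (c : Int × Int) :
    Int × PySem.Dict (Int × Int) (List (Int × Int)) :=
  if (pvAt g c.1 c.2 == 1) && !(PySem.Dict.contains st.2 c) then
    (max st.1 ((pvC g n c).length : Int),
      (pvC g n c).foldl (fun d x => PySem.Dict.insert d x (pvC g n c)) st.2)
  else st

lemma stepB {g : List (List Int)} {n : Int} {Ls : List (List (Int × Int))}
    {st : Int × PySem.Dict (Int × Int) (List (Int × Int))}
    {c : Int × Int} (hn : 0 ≤ n) (hb : pvInB n c) (hInv : BInv g n Ls st) :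
    BInv g n (pvRefStep g n Ls c) (pvStep1B g n st c) := by
  have hcont : PySem.Dict.contains st.2 c = decide (c ∈ Ls.flatten) := by
    rw [PySem.Dict.contains_eq_isSome_get?, hInv.comp c]
    by_cases hm : c ∈ Ls.flatten
    · simp [find?_isSome_iff_flatten.2 hm, hm]
    · have hf : (Ls.find? (fun L => decide (c ∈ L))).isSome = false := by
        cases h : (Ls.find? (fun L => decide (c ∈ L))).isSome
        · rfl
        · exact absurd (find?_isSome_iff_flatten.1 h) hm
      simp [hf, hm]
  by_cases hguard : pvIsOne g n c = true ∧ c ∉ Ls.flatten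
  · obtain ⟨hone, hfresh⟩ := hguard
    have hgB : ((pvAt g c.1 c.2 == 1) && !(PySem.Dict.contains st.2 c)) = true := by
      rw [hcont]
      rw [pvIsOne_of_inB hb] at hone
      simp [hone, hfresh]
    rw [pvStep1B, hgB, pvRefStep, if_pos ⟨hone, hfresh⟩]
    simp only [if_true]
    have hInv' : RefInv g n (Ls ++ [pvC g n c]) := refInv_append hn hInv.ref hone hfresh
    refine ⟨hInv', ?_, ?_⟩
    · simp only []
      rw [hInv.best]
      rw [show (Ls ++ [pvC g n c]).map (fun L => (L.length : Int)) =
        Ls.map (fun L => (L.length : Int)) ++ [((pvC g n c).length : Int)] by simp]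
      rw [List.foldl_append]
      simp
    · intro x
      simp only []
      rw [get?_foldl_insert_const, hInv.comp x, List.find?_append]
      by_cases hx : x ∈ pvC g n c
      · have hnone : Ls.find? (fun L => decide (x ∈ L)) = none := by
          rw [List.find?_eq_none]
          intro L hL
          simp only [decide_eq_true_eq]
          intro hxL
          exact fresh_class hInv.ref hone hfresh x hx (List.mem_flatten.2 ⟨L, hL, hxL⟩)
        rw [if_pos hx, hnone]
        simp [hx]
      · rw [if_neg hx]
        rcases h : Ls.find? (fun L => decide (x ∈ L)) with _ | L
        · simp [hx]
        · simp
  · have hgB : ((pvAt g c.1 c.2 == 1) && !(PySem.Dict.contains st.2 c)) = false := by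
      rw [hcont, ← pvIsOne_of_inB (g := g) hb]
      rcases Decidable.not_and_iff_not_or_not.1 hguard with h | h
      · simp [h]
      · simp [Decidable.not_not.1 h]
    rw [pvStep1B, hgB, pvRefStep, if_neg hguard]
    simp only [Bool.false_eq_true, if_false]
    exact hInv

lemma B_phase1 {g : List (List Int)} {n : Int} (hn : 0 ≤ n) :
    ∀ (scan : List (Int × Int)) (Ls : List (List (Int × Int)))
      (st : Int × PySem.Dict (Int × Int) (List (Int × Int))),
    (∀ c ∈ scan, pvInB n c) → BInv g n Ls st →
    BInv g n (scan.foldl (pvRefStep g n) Ls) (scan.foldl (pvStep1B g n) st) := by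
  intro scan
  induction scan with
  | nil => intro Ls st _ h; exact h
  | cons c scan ih =>
    intro Ls st hb h
    exact ih _ _ (fun d hd => hb d (by simp [hd])) (stepB hn (hb c (by simp)) h)

def pvScan (n : Int) : List (Int × Int) :=
  (PySem.List.pyRange 0 n 1).flatMap
    (fun i => (PySem.List.pyRange 0 n 1).map (fun j => (i, j)))

lemma mem_pvScan {n : Int} {c : Int × Int} : c ∈ pvScan n ↔ pvInB n c := by
  simp only [pvScan, List.mem_flatMap, List.mem_map, PySem.List.mem_pyRange_one]
  constructor
  · rintro ⟨i, hi, j, hj, rfl⟩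
    exact ⟨hi.1, hi.2, hj.1, hj.2⟩
  · rintro ⟨h1, h2, h3, h4⟩
    exact ⟨c.1, ⟨h1, h2⟩, c.2, ⟨h3, h4⟩, rfl⟩

lemma foldl_nested_ranges {σ : Type} (f : σ → Int × Int → σ) (n : Int) :
    ∀ (l : List Int) (init : σ),
    l.foldl (fun st i => (PySem.List.pyRange 0 n 1).foldl (fun st j => f st (i, j)) st) init
    = (l.flatMap (fun i => (PySem.List.pyRange 0 n 1).map (fun j => (i, j)))).foldl f init := by
  intro l
  induction l with
  | nil => intro init; rfl
  | cons a l ih =>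
    intro init
    rw [List.foldl_cons, List.flatMap_cons, List.foldl_append, ih, List.foldl_map]

lemma ref_flatten_mono {g : List (List Int)} {n : Int} {x : Int × Int} :
    ∀ (scan : List (Int × Int)) (Ls : List (List (Int × Int))),
    x ∈ Ls.flatten → x ∈ (scan.foldl (pvRefStep g n) Ls).flatten := by
  intro scan
  induction scan with
  | nil => intro Ls h; exact h
  | cons c scan ih =>
    intro Ls h
    refine ih _ ?_
    rw [pvRefStep]
    split
    · simp only [List.flatten_append]
      exact List.mem_append.2 (Or.inl h)
    · exact h

lemma ref_covers {g : List (List Int)} {n : Int} {x : Int × Int} :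
    ∀ (scan : List (Int × Int)) (Ls : List (List (Int × Int))),
    x ∈ scan → pvIsOne g n x = true → x ∈ (scan.foldl (pvRefStep g n) Ls).flatten := by
  intro scan
  induction scan with
  | nil => intro Ls h; cases h
  | cons c scan ih =>
    intro Ls hx hone
    rw [List.foldl_cons]
    rcases List.mem_cons.1 hx with rfl | hx'
    · refine ref_flatten_mono scan _ ?_
      rw [pvRefStep]
      by_cases hfl : x ∈ Ls.flatten
      · split
        · simp only [List.flatten_append]
          exact List.mem_append.2 (Or.inl hfl)
        · exact hfl
      · rw [if_pos ⟨hone, hfl⟩]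
        simp only [List.flatten_append, List.flatten_cons, List.flatten_nil,
          List.append_nil]
        exact List.mem_append.2 (Or.inr (pvC_mem_self x))
    · exact ih _ hx' hone

lemma ite_lt_eq_max (m x : Int) : (if m < x then x else m) = max m x := by
  rw [max_def]
  split_ifs <;> omega

lemma ite_max_some (m y : Int) :
    (if m < y then some y else some m) = some (max m y) := by
  rw [← ite_lt_eq_max]; split <;> rfl

lemma max?_cons_eq_foldl : ∀ (ys : List Int) (m : Int),
    PySem.List.max? (m :: ys) (fun v => v) = some (ys.foldl max m) := by
  intro ys
  induction ys with
  | nil => intro m; rfl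
  | cons y ys ih =>
    intro m
    have h1 : PySem.List.max? (m :: y :: ys) (fun v => v)
        = PySem.List.max? (max m y :: ys) (fun v => v) := by
      simp only [PySem.List.max?, List.foldl_cons]
      congr 1
      show (if m < y then some y else some m) = some (max m y)
      exact ite_max_some m y
    rw [h1, ih (max m y), List.foldl_cons]

lemma maxD_eq_foldl_max (xs : List Int) (h : ∀ x ∈ xs, 0 ≤ x) :
    PySem.List.maxD xs (fun v => v) 0 = xs.foldl max 0 := by
  cases xs with
  | nil => rfl
  | cons x xs =>
    rw [PySem.List.maxD, max?_cons_eq_foldl xs x]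
    rw [show (some (xs.foldl max x)).getD 0 = xs.foldl max x from rfl]
    rw [List.foldl_cons, show max 0 x = x from by have := h x (by simp); omega]

lemma phase2_cell {g : List (List Int)} {n : Int} {Ls : List (List (Int × Int))}
    (cmapF : PySem.Dict (Int × Int) Int) (csizeF : PySem.Dict Int Int)
    (compF : PySem.Dict (Int × Int) (List (Int × Int)))
    (hInv : RefInv g n Ls)
    (hcov : ∀ x, pvIsOne g n x = true → x ∈ Ls.flatten)
    (hcmap : ∀ x, cmapF.get? x = pvIdx Ls x)
    (hitems : csizeF.items = PySem.List.enumerate (Ls.map (fun L => (L.length : Int))) 0)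
    (hcomp : ∀ x, compF.get? x = Ls.find? (fun L => decide (x ∈ L))) :
    ∀ (nbs : List (Int × Int)) (seen : PySem.Set Int) (counted : PySem.Set (Int × Int))
      (tot : Int),
    (∀ x : Int × Int, x ∈ counted ↔
      ∃ (k : Nat) (L : List (Int × Int)), Ls[k]? = some L ∧ ((k : Int) ∈ seen) ∧ x ∈ L) →
    (nbs.foldl (fun t nb =>
        if pvIsOne g n nb then
          let cid := PySem.Dict.getD cmapF nb 0
          if !(PySem.Set.contains t.1 cid) then
            (PySem.Set.add t.1 cid, t.2 + PySem.Dict.getD csizeF cid 0)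
          else t
        else t) (seen, tot)).2
    = (nbs.foldl (fun t nb =>
        if PySem.Dict.contains compF nb && !(PySem.Set.contains t.1 nb) then
          (PySem.Set.union t.1 (PySem.Dict.getD compF nb []),
           t.2 + ((PySem.Dict.getD compF nb []).length : Int))
        else t) (counted, tot)).2 := by
  have hkeysnd : csizeF.keys.Nodup := by
    have hkeys : csizeF.keys = List.map (fun x => x.1) csizeF.items := rfl
    rw [hkeys, hitems, PySem.List.map_fst_enumerate]
    exact PySem.List.nodup_pyRange_one _ _
  intro nbs
  induction nbs with
  | nil => intro seen counted tot _; rfl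
  | cons nb nbs ih =>
    intro seen counted tot hrel
    rw [List.foldl_cons, List.foldl_cons]
    by_cases hone : pvIsOne g n nb = true
    · obtain ⟨L, hLmem, hnbL⟩ := List.mem_flatten.1 (hcov nb hone)
      obtain ⟨k, hk⟩ := List.mem_iff_getElem?.1 hLmem
      have hkl : k < Ls.length := List.getElem?_eq_some_iff.1 hk |>.1
      have hidx : PySem.Dict.getD cmapF nb 0 = (k : Int) := by
        rw [PySem.Dict.getD_eq_get?_getD, hcmap nb, pvIdx_eq_some_of hInv hk hnbL]
        rfl
      have hcontC : PySem.Dict.contains compF nb = true := by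
        rw [PySem.Dict.contains_eq_isSome_get?, hcomp nb, find?_class_of hInv hk hnbL]
        rfl
      have hgetC : PySem.Dict.getD compF nb [] = L := by
        rw [PySem.Dict.getD_eq_get?_getD, hcomp nb, find?_class_of hInv hk hnbL]
        rfl
      have hseen : ((k : Int) ∈ seen) ↔ nb ∈ counted := by
        constructor
        · intro hs
          exact (hrel nb).2 ⟨k, L, hk, hs, hnbL⟩
        · intro hc
          obtain ⟨k', L', hk', hs', hnb'⟩ := (hrel nb).1 hc
          have := class_unique hInv hk' hnb' hk hnbL
          subst this
          exact hs'
      rw [if_pos hone, hidx]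
      by_cases hs : (k : Int) ∈ seen
      · have hsA : PySem.Set.contains seen ((k : Int)) = true :=
          (PySem.Set.contains_iff _ _).2 hs
        have hsB : PySem.Set.contains counted nb = true :=
          (PySem.Set.contains_iff _ _).2 (hseen.1 hs)
        simp only [hsA, hsB, hcontC, Bool.not_true, Bool.and_false,
          Bool.false_eq_true, if_false]
        exact ih seen counted tot hrel
      · have hsA : PySem.Set.contains seen ((k : Int)) = false := by
          cases hc : PySem.Set.contains seen ((k : Int))
          · rfl
          · exact absurd ((PySem.Set.contains_iff _ _).1 hc) hs
        have hncB : nb ∉ counted := fun h => hs (hseen.2 h)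
        have hsB : PySem.Set.contains counted nb = false := by
          cases hc : PySem.Set.contains counted nb
          · rfl
          · exact absurd ((PySem.Set.contains_iff _ _).1 hc) hncB
        simp only [hsA, hsB, hcontC, Bool.not_false, Bool.and_true, if_true]
        have hLk : Ls[k] = L := by
          have h2 := hk
          rw [List.getElem?_eq_getElem hkl] at h2
          exact Option.some.inj h2
        have hsize : PySem.Dict.getD csizeF ((k : Int)) 0 = (L.length : Int) := by
          have hk2 : k < (PySem.List.enumerate (Ls.map (fun L => (L.length : Int))) 0).length := by
            simpa [PySem.List.length_enumerate] using hkl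
          have hge := PySem.List.getElem_enumerate (Ls.map (fun L => (L.length : Int))) 0 k hk2
          have hval : (Ls.map (fun L => (L.length : Int)))[k]'(by simpa using hkl)
              = (L.length : Int) := by
            simp [hLk]
          have hmemit : (((0 : Int) + (k : Int)), (L.length : Int)) ∈ csizeF.items := by
            rw [hitems, ← hval, ← hge]
            exact List.getElem_mem hk2
          have hgd := PySem.Dict.getD_of_mem_items _ hmemit hkeysnd 0
          simpa using hgd
        rw [hsize, hgetC]
        refine ih _ _ _ ?_
        intro x
        rw [PySem.Set.mem_union _ _ _]
        constructor
        · rintro (hx | hx)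
          · obtain ⟨k', L', hk', hs', hx'⟩ := (hrel x).1 hx
            exact ⟨k', L', hk', (PySem.Set.mem_add _ _ _).2 (Or.inl hs'), hx'⟩
          · exact ⟨k, L, hk, (PySem.Set.mem_add _ _ _).2 (Or.inr rfl), hx⟩
        · rintro ⟨k', L', hk', hs', hx'⟩
          rcases (PySem.Set.mem_add _ _ _).1 hs' with h | h
          · exact Or.inl ((hrel x).2 ⟨k', L', hk', h, hx'⟩)
          · have hkk : k' = k := by
              have : ((k' : Int)) = ((k : Int)) := h
              exact_mod_cast this
            subst hkk
            rw [hk] at hk'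
            right
            cases hk'
            exact hx'
    · have hgA : pvIsOne g n nb = false := by
        cases h : pvIsOne g n nb
        · rfl
        · exact absurd h hone
      have hncB : PySem.Dict.contains compF nb = false := by
        cases hc : PySem.Dict.contains compF nb
        · rfl
        · exfalso
          rw [PySem.Dict.contains_eq_isSome_get?, hcomp nb] at hc
          rcases hfind : Ls.find? (fun L => decide (nb ∈ L)) with _ | L
          · rw [hfind] at hc; cases hc
          · have hLm : L ∈ Ls := List.mem_of_find?_eq_some hfind
            have hnbm : nb ∈ L := by simpa using List.find?_some hfind
            exact hone (hInv.one L hLm nb hnbm)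
      rw [hgA, hncB]
      simp only [Bool.false_eq_true, if_false, Bool.false_and]
      exact ih seen counted tot hrel

def pvStep2A (g : List (List Int)) (n : Int) (cmapF : PySem.Dict (Int × Int) Int)
    (csizeF : PySem.Dict Int Int) (best : Int) (c : Int × Int) : Int :=
  if pvAt g c.1 c.2 == 0 then
    max best ((pvNbrs c).foldl (fun t nb =>
      if pvIsOne g n nb then
        let cid := PySem.Dict.getD cmapF nb 0
        if !(PySem.Set.contains t.1 cid) then
          (PySem.Set.add t.1 cid, t.2 + PySem.Dict.getD csizeF cid 0)
        else t
      else t) (([] : PySem.Set Int), (1 : Int))).2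
  else best

def pvStep2B (g : List (List Int)) (compF : PySem.Dict (Int × Int) (List (Int × Int)))
    (best : Int) (c : Int × Int) : Int :=
  if pvAt g c.1 c.2 == 0 then
    max best ((pvNbrs c).foldl (fun t nb =>
      if PySem.Dict.contains compF nb && !(PySem.Set.contains t.1 nb) then
        (PySem.Set.union t.1 (PySem.Dict.getD compF nb []),
         t.2 + ((PySem.Dict.getD compF nb []).length : Int))
      else t) (([] : PySem.Set (Int × Int)), (1 : Int))).2
  else best

theorem MaxConnection_eq_alt (g : List (List Int)) : MaxConnection g = MaxConnection_alt g := by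
  by_cases hg : g = []
  · subst hg; rfl
  · have hn : 0 < ((g.length : Int)) := by
      cases g with
      | nil => exact absurd rfl hg
      | cons r g' => simp
    have hn0 : ¬(((g.length : Int)) = 0) := by omega
    have hnn : 0 ≤ ((g.length : Int)) := le_of_lt hn
    have e1 : MaxConnection g = (if ((g.length : Int)) = 0 then 0 else
        (PySem.List.pyRange 0 ((g.length : Int)) 1).foldl (fun best i =>
          (PySem.List.pyRange 0 ((g.length : Int)) 1).foldl (fun best j =>
            pvStep2A g ((g.length : Int))
              ((PySem.List.pyRange 0 ((g.length : Int)) 1).foldl (fun st i =>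
                (PySem.List.pyRange 0 ((g.length : Int)) 1).foldl
                  (fun st j => pvStep1A g ((g.length : Int)) st (i, j)) st)
                (([] : PySem.Set (Int × Int)), (PySem.Dict.empty : PySem.Dict Int Int),
                 (PySem.Dict.empty : PySem.Dict (Int × Int) Int), (0 : Int))).2.2.1
              ((PySem.List.pyRange 0 ((g.length : Int)) 1).foldl (fun st i =>
                (PySem.List.pyRange 0 ((g.length : Int)) 1).foldl
                  (fun st j => pvStep1A g ((g.length : Int)) st (i, j)) st)
                (([] : PySem.Set (Int × Int)), (PySem.Dict.empty : PySem.Dict Int Int),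
                 (PySem.Dict.empty : PySem.Dict (Int × Int) Int), (0 : Int))).2.1
              best (i, j)) best)
          (PySem.List.maxD (PySem.Dict.values
            ((PySem.List.pyRange 0 ((g.length : Int)) 1).foldl (fun st i =>
                (PySem.List.pyRange 0 ((g.length : Int)) 1).foldl
                  (fun st j => pvStep1A g ((g.length : Int)) st (i, j)) st)
                (([] : PySem.Set (Int × Int)), (PySem.Dict.empty : PySem.Dict Int Int),
                 (PySem.Dict.empty : PySem.Dict (Int × Int) Int), (0 : Int))).2.1)
            (fun v => v) 0)) := rfl
    have e2 : MaxConnection_alt g =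
        (PySem.List.pyRange 0 ((g.length : Int)) 1).foldl (fun best i =>
          (PySem.List.pyRange 0 ((g.length : Int)) 1).foldl (fun best j =>
            pvStep2B g
              ((PySem.List.pyRange 0 ((g.length : Int)) 1).foldl (fun st i =>
                (PySem.List.pyRange 0 ((g.length : Int)) 1).foldl
                  (fun st j => pvStep1B g ((g.length : Int)) st (i, j)) st)
                ((0 : Int), (PySem.Dict.empty : PySem.Dict (Int × Int) (List (Int × Int))))).2
              best (i, j)) best)
          ((PySem.List.pyRange 0 ((g.length : Int)) 1).foldl (fun st i =>
                (PySem.List.pyRange 0 ((g.length : Int)) 1).foldl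
                  (fun st j => pvStep1B g ((g.length : Int)) st (i, j)) st)
                ((0 : Int), (PySem.Dict.empty : PySem.Dict (Int × Int) (List (Int × Int))))).1 := rfl
    rw [e1, if_neg hn0, e2]
    rw [foldl_nested_ranges (pvStep1A g ((g.length : Int))) ((g.length : Int)),
        foldl_nested_ranges (pvStep1B g ((g.length : Int))) ((g.length : Int))]
    set scan := (PySem.List.pyRange 0 ((g.length : Int)) 1).flatMap
      (fun i => (PySem.List.pyRange 0 ((g.length : Int)) 1).map (fun j => (i, j))) with hscan
    set stA := scan.foldl (pvStep1A g ((g.length : Int)))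
      (([] : PySem.Set (Int × Int)), (PySem.Dict.empty : PySem.Dict Int Int),
       (PySem.Dict.empty : PySem.Dict (Int × Int) Int), (0 : Int)) with hstA
    set stB := scan.foldl (pvStep1B g ((g.length : Int)))
      ((0 : Int), (PySem.Dict.empty : PySem.Dict (Int × Int) (List (Int × Int)))) with hstB
    rw [foldl_nested_ranges (pvStep2A g ((g.length : Int)) stA.2.2.1 stA.2.1) ((g.length : Int)),
        foldl_nested_ranges (pvStep2B g stB.2) ((g.length : Int)), ← hscan]
    have hbscan : ∀ c ∈ scan, pvInB ((g.length : Int)) c := by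
      intro c hc
      exact mem_pvScan.1 hc
    have hAInv : AInv g ((g.length : Int)) (scan.foldl (pvRefStep g ((g.length : Int))) []) stA := by
      rw [hstA]
      refine A_phase1 hnn scan [] _ hbscan ?_
      refine ⟨refInv_nil g _, by simp, ?_, rfl, by simp⟩
      intro x; rfl
    have hBInv : BInv g ((g.length : Int)) (scan.foldl (pvRefStep g ((g.length : Int))) []) stB := by
      rw [hstB]
      refine B_phase1 hnn scan [] _ hbscan ?_
      refine ⟨refInv_nil g _, rfl, ?_⟩
      intro x; rfl
    set Ls := scan.foldl (pvRefStep g ((g.length : Int))) [] with hLs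
    have hcov : ∀ x, pvIsOne g ((g.length : Int)) x = true → x ∈ Ls.flatten := by
      intro x hone
      exact ref_covers scan [] (mem_pvScan.2 (pvIsOne_inB hone)) hone
    have hinit : PySem.List.maxD (PySem.Dict.values stA.2.1) (fun v => v) 0 = stB.1 := by
      rw [show PySem.Dict.values stA.2.1 = List.map (fun p => p.2) stA.2.1.items from rfl,
          hAInv.csize, PySem.List.map_snd_enumerate,
          maxD_eq_foldl_max _ (by
            intro x hx
            obtain ⟨L, _, rfl⟩ := List.mem_map.1 hx
            exact Int.natCast_nonneg _),
          hBInv.best]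
    rw [hinit]
    refine PySem.List.foldl_congr_mem scan _ _ _ ?_
    intro acc c _
    rw [pvStep2A, pvStep2B]
    by_cases h0 : (pvAt g c.1 c.2 == 0) = true
    · rw [if_pos h0, if_pos h0]
      have := phase2_cell stA.2.2.1 stA.2.1 stB.2 hAInv.ref hcov hAInv.cmap hAInv.csize
        hBInv.comp (pvNbrs c) [] [] 1 (by intro x; simp)
      rw [this]
    · rw [if_neg h0, if_neg h0]

-- ===== VERDICT (by name: the statement is the Claim_ definition above) =====
theorem MaxConnection_spec : Claim_equal_MaxConnection := by
  intro grid _ _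
  exact MaxConnection_eq_alt grid
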